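-- pv_equiv track=rewrite | github.com/trixirt/rocFFT | scripts/perf/perflib/html.py | token_to_elements
-- ===== SOURCE A (Python) =====
-- def token_to_length(tokens):
--     length = []
--     for token in tokens:
--         words = token.split("_")
--         for idx in range(len(words)):
--             if(words[idx] == "len"):
--                 lenidx = idx + 1
--                 thislength = []
--                 while lenidx < len(words) and words[lenidx].isnumeric():
--                     thislength.append(int(words[lenidx]))
--                     lenidx += 1
--                 length.append(thislength)
--     return length
--
-- def token_to_batch(tokens):
--     batch = []
--     for token in tokens:
--         words = token.split("_")
--         for idx in range(len(words)):
--             if(words[idx] == "batch"):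
--                 batchidx = idx + 1
--                 thisbatch = []
--                 while batchidx < len(words) and words[batchidx].isnumeric():
--                     thisbatch.append(int(words[batchidx]))
--                     batchidx += 1
--                 batch.append(thisbatch)
--     return batch
--
-- def token_to_elements(tokens):
--     length = token_to_length(tokens)
--     batch = token_to_batch(tokens)
--     elements = []
--     for i in range(len(length)):
--         n = int(1)
--         for j in range(len(length[i])):
--             n *= int(length[i][j])
--         for j in range(len(batch[i])):
--             n *= int(batch[i][j])
--         elements.append(n)
--     return elements
-- ===== SOURCE B (Python) =====
-- def token_to_elements(tokens):
--     # Single fused pass: running products per keyword group instead of two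
--     # full token scans building lists-of-lists plus a third combining loop.
--     lengths = []
--     batches = []
--     for token in tokens:
--         words = token.split("_")
--         for i, w in enumerate(words):
--             if w == "len" or w == "batch":
--                 p = 1
--                 j = i + 1
--                 while j < len(words) and words[j].isnumeric():
--                     p *= int(words[j])
--                     j += 1
--                 if w == "len":
--                     lengths.append(p)
--                 else:
--                     batches.append(p)
--     return [lengths[i] * batches[i] for i in range(len(lengths))]
-- ===== Notes on version B (the rewrite author's own statement) =====
-- stated objective: simpler
-- what changed: B inlines the two helper functions and fuses A's two full token scans plus a third index loop into one pass that keeps running products per 'len'/'batch' group instead of building intermediate lists-of-lists, then a single pairwise-multiply comprehension.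
import Mathlib
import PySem

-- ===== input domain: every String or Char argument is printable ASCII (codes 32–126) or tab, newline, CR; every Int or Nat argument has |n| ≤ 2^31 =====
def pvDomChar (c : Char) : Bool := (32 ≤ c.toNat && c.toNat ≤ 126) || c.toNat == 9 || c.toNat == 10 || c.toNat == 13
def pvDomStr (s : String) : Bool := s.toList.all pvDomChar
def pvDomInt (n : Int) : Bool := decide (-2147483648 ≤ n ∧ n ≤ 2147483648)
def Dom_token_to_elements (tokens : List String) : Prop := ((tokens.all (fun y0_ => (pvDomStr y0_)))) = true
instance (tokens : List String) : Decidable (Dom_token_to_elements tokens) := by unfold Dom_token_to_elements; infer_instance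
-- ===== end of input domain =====

-- B fuses A's two helper scans into one pass keeping running products, replacing
-- lists-of-lists plus a third combining loop (objective: simpler decomposition).

-- ===== PORT A =====
-- while lenidx < len(words) and words[lenidx].isnumeric(): thislength.append(int(words[lenidx]))
-- (recursion over the suffix words[idx+1:]; isnumeric = isdigit on the ASCII domain;
--  int() always succeeds on an isdigit word, so getD 0 is never the taken branch)
def pvTakeNum : List String → List Int
  | [] => []
  | w :: rest =>
    if PySem.Str.strIsdigit w then ((PySem.Int.ofStr? w).getD 0) :: pvTakeNum rest else []

-- for idx in range(len(words)): if words[idx] == "len": … append group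
def pvScanLen : List String → List (List Int)
  | [] => []
  | w :: rest => (if w == "len" then [pvTakeNum rest] else []) ++ pvScanLen rest

def pvScanBatch : List String → List (List Int)
  | [] => []
  | w :: rest => (if w == "batch" then [pvTakeNum rest] else []) ++ pvScanBatch rest

def token_to_length (tokens : List String) : List (List Int) :=
  tokens.foldl (fun length token => length ++ pvScanLen ((PySem.Str.split? token "_").getD [])) []

def token_to_batch (tokens : List String) : List (List Int) :=
  tokens.foldl (fun batch token => batch ++ pvScanBatch ((PySem.Str.split? token "_").getD [])) []

def token_to_elements (tokens : List String) : List Int :=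
  let length := token_to_length tokens
  let batch := token_to_batch tokens
  (List.range length.length).foldl (fun elements i =>
    let li := length.getD i []
    -- batch[i] raises IndexError when i ≥ len(batch); Pre_ excludes those inputs
    let bi := (PySem.List.pyGet? batch i).getD []
    let n : Int := li.foldl (fun n x => n * x) 1
    let n := bi.foldl (fun n x => n * x) n
    elements ++ [n]) []

-- ===== PORT B =====
-- p = 1; while j < len(words) and words[j].isnumeric(): p *= int(words[j])
def pvProdNum : List String → Int → Int
  | [], p => p
  | w :: rest, p =>
    if PySem.Str.strIsdigit w then pvProdNum rest (p * (PySem.Int.ofStr? w).getD 0) else p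

-- for i, w in enumerate(words): if w == "len" or w == "batch": … append product
def pvScanTok : List String → List Int × List Int → List Int × List Int
  | [], st => st
  | w :: rest, st =>
    pvScanTok rest
      (if w == "len" then (st.1 ++ [pvProdNum rest 1], st.2)
       else if w == "batch" then (st.1, st.2 ++ [pvProdNum rest 1])
       else st)

def token_to_elements_alt (tokens : List String) : List Int :=
  let st := tokens.foldl (fun st token => pvScanTok ((PySem.Str.split? token "_").getD []) st) ([], [])
  (List.range st.1.length).map (fun i =>
    st.1.getD i 1 * (PySem.List.pyGet? st.2 i).getD 0)

-- ===== PRECONDITION & SPEC =====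
-- Pre_ excludes inputs with more "len" words than "batch" words across the split
-- tokens: there BOTH Pythons raise IndexError when indexing the batch list.
def Pre_token_to_elements (tokens : List String) : Prop :=
  (tokens.map (fun t => ((PySem.Str.split? t "_").getD []).count "len")).sum ≤
    (tokens.map (fun t => ((PySem.Str.split? t "_").getD []).count "batch")).sum
instance (tokens : List String) : Decidable (Pre_token_to_elements tokens) := by
  unfold Pre_token_to_elements; infer_instance

def pvWitness_token_to_elements : List String := ["len_4_4_batch_10", "len_167_batch_3_5"]

def Spec_token_to_elements (tokens : List String) (out : List Int) : Prop := out = token_to_elements_alt tokens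
instance (tokens : List String) (out : List Int) : Decidable (Spec_token_to_elements tokens out) := by unfold Spec_token_to_elements; infer_instance

-- ===== CLAIM (what is proved, stated in full; the proofs are below) =====
def Claim_equal_token_to_elements : Prop := ∀ (tokens : List String), Dom_token_to_elements tokens → Pre_token_to_elements tokens → Spec_token_to_elements tokens (token_to_elements tokens)

-- ===== LEMMAS AND PROOFS =====

def pvProd1 (l : List Int) : Int := l.foldl (fun n x => n * x) 1

theorem pvProdNum_eq (ws : List String) (p : Int) :
    pvProdNum ws p = (pvTakeNum ws).foldl (fun n x => n * x) p := by
  induction ws generalizing p with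
  | nil => rfl
  | cons w rest ih =>
    simp only [pvProdNum, pvTakeNum]
    split <;> simp [ih]

theorem pvScanTok_eq (ws : List String) (st : List Int × List Int) :
    pvScanTok ws st =
      (st.1 ++ (pvScanLen ws).map pvProd1, st.2 ++ (pvScanBatch ws).map pvProd1) := by
  induction ws generalizing st with
  | nil => simp [pvScanTok, pvScanLen, pvScanBatch]
  | cons w rest ih =>
    simp only [pvScanTok, pvScanLen, pvScanBatch, ih]
    by_cases h1 : w == "len"
    · have : ¬ (w == "batch") := by
        simp only [beq_iff_eq] at h1 ⊢; simp [h1]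
      simp [h1, this, pvProd1, pvProdNum_eq]
    · by_cases h2 : w == "batch" <;> simp [h1, h2, pvProd1, pvProdNum_eq]

theorem pvFold_st (tokens : List String) (st : List Int × List Int) :
    tokens.foldl (fun st token => pvScanTok ((PySem.Str.split? token "_").getD []) st) st =
      (st.1 ++ (tokens.flatMap (fun t => pvScanLen ((PySem.Str.split? t "_").getD []))).map pvProd1,
       st.2 ++ (tokens.flatMap (fun t => pvScanBatch ((PySem.Str.split? t "_").getD []))).map pvProd1) := by
  induction tokens generalizing st with
  | nil => simp
  | cons t rest ih =>
    rw [List.foldl_cons, ih, pvScanTok_eq]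
    simp [List.append_assoc]

theorem token_to_length_eq (tokens : List String) :
    token_to_length tokens = tokens.flatMap (fun t => pvScanLen ((PySem.Str.split? t "_").getD [])) := by
  unfold token_to_length
  rw [PySem.List.foldl_append_eq_flatMap]
  simp

theorem token_to_batch_eq (tokens : List String) :
    token_to_batch tokens = tokens.flatMap (fun t => pvScanBatch ((PySem.Str.split? t "_").getD [])) := by
  unfold token_to_batch
  rw [PySem.List.foldl_append_eq_flatMap]
  simp

theorem pvScanLen_length (ws : List String) : (pvScanLen ws).length = ws.count "len" := by
  induction ws with
  | nil => rfl
  | cons w rest ih =>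
    simp only [pvScanLen, List.count_cons, List.length_append, ih]
    by_cases h : w == "len" <;> (simp [h]; try omega)

theorem pvScanBatch_length (ws : List String) : (pvScanBatch ws).length = ws.count "batch" := by
  induction ws with
  | nil => rfl
  | cons w rest ih =>
    simp only [pvScanBatch, List.count_cons, List.length_append, ih]
    by_cases h : w == "batch" <;> (simp [h]; try omega)

theorem pvFoldMul (l : List Int) (p : Int) :
    l.foldl (fun n x => n * x) p = p * pvProd1 l := by
  induction l generalizing p with
  | nil => simp [pvProd1]
  | cons x rest ih =>
    simp only [pvProd1, List.foldl_cons] at *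
    rw [ih, ih (1 * x)]; ring

-- ===== VERDICT (by name: the statement is the Claim_ definition above) =====
theorem token_to_elements_spec : Claim_equal_token_to_elements := by
  intro tokens _ hpre
  unfold Spec_token_to_elements token_to_elements token_to_elements_alt
  rw [pvFold_st]
  simp only []
  set L := tokens.flatMap (fun t => pvScanLen ((PySem.Str.split? t "_").getD [])) with hL
  set B := tokens.flatMap (fun t => pvScanBatch ((PySem.Str.split? t "_").getD [])) with hB
  have hlen : L.length ≤ B.length := by
    unfold Pre_token_to_elements at hpre
    simp only [hL, hB, List.length_flatMap, pvScanLen_length, pvScanBatch_length]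
    exact hpre
  rw [token_to_length_eq, token_to_batch_eq, ← hL, ← hB]
  rw [PySem.List.foldl_append_singleton_eq_map]
  simp only [List.nil_append, List.length_map]
  apply List.map_congr_left
  intro i hi
  have hiL : i < L.length := List.mem_range.mp hi
  have hiB : i < B.length := lt_of_lt_of_le hiL hlen
  have hget : PySem.List.pyGet? B (i : Int) = some B[i] := by
    simp [PySem.List.pyGet?, PySem.List.pyIdx?, hiB]
  have hgetm : PySem.List.pyGet? (B.map pvProd1) (i : Int) = some (pvProd1 B[i]) := by
    simp [PySem.List.pyGet?, PySem.List.pyIdx?, hiB]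
  rw [hget, hgetm]
  simp only [Option.getD_some, List.getD_eq_getElem?_getD, List.getElem?_map,
    List.getElem?_eq_getElem hiL, Option.map_some, Option.getD_some]
  rw [pvFoldMul]
  rfl
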